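-- pv_equiv track=rewrite | github.com/HeoSeunghoi/BaekJoon | BJ1541.py | function
-- ===== SOURCE A (Python) =====
-- def function(num, operand):
--     s = num[0]
--     flag = 0
--     for i in range(len(operand)):
--         if operand[i] == "-":
--             flag = 1
--
--         if flag == 0:
--             s += num[i+1]
--         else:
--             s -= num[i+1]
--     return s
-- ===== SOURCE B (Python) =====
-- def function(num, operand):
--     result = num[0]
--     if "-" not in operand:
--         return result + sum(num[1:len(operand) + 1])
--     j = operand.index("-")
--     return result + sum(num[1:j + 1]) - sum(num[j + 1:len(operand) + 1])
-- ===== Notes on version B (the rewrite author's own statement) =====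
-- stated objective: simpler
-- what changed: Replaces A's elementwise flag-toggled accumulation loop with locating the first '-' once and adding/subtracting two bulk slice sums.
import Mathlib
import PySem

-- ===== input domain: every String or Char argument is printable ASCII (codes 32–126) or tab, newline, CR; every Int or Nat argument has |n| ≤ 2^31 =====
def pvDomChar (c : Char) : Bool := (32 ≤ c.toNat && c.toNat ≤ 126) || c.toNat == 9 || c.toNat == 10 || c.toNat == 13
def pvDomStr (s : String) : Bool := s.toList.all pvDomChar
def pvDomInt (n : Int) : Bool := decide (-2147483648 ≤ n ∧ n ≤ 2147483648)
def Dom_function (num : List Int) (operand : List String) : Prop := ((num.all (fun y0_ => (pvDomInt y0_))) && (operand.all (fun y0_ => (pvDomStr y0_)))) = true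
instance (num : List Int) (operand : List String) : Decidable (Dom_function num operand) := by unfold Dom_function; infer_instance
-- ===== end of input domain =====

-- B replaces A's flag-toggled elementwise loop by locating the first "-" once and combining two bulk slice sums.

-- ===== PORT A =====
def function (num : List Int) (operand : List String) : Int :=
  let s : Int := PySem.List.pyGetD num 0 0
  let r := (PySem.List.pyRange 0 (PySem.List.len operand) 1).foldl
    (fun (st : Int × Int) (i : Int) =>
      let flag : Int := if PySem.List.pyGetD operand i "" = "-" then 1 else st.2
      if flag = 0 then (st.1 + PySem.List.pyGetD num (i + 1) 0, flag)
      else (st.1 - PySem.List.pyGetD num (i + 1) 0, flag))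
    (s, 0)
  r.1

-- ===== PORT B =====
def function_alt (num : List Int) (operand : List String) : Int :=
  let result : Int := PySem.List.pyGetD num 0 0
  match PySem.List.index? operand "-" with
  | none => result + (PySem.List.slice num (some 1) (some (PySem.List.len operand + 1))).sum
  | some j =>
      result + (PySem.List.slice num (some 1) (some ((j : Int) + 1))).sum
        - (PySem.List.slice num (some ((j : Int) + 1)) (some (PySem.List.len operand + 1))).sum

-- ===== PRECONDITION & SPEC =====
-- A indexes num[0] and num[i+1] for every i below len(operand): it raises IndexError unless num has more elements than operand.
def Pre_function (num : List Int) (operand : List String) : Prop := operand.length < num.length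
instance (num : List Int) (operand : List String) : Decidable (Pre_function num operand) := by unfold Pre_function; infer_instance
def pvWitness_function : List Int × List String := ([1, 2, 3], ["+", "-"])

def Spec_function (num : List Int) (operand : List String) (out : Int) : Prop := out = function_alt num operand
instance (num : List Int) (operand : List String) (out : Int) : Decidable (Spec_function num operand out) := by unfold Spec_function; infer_instance

-- ===== CLAIM (what is proved, stated in full; the proofs are below) =====
def Claim_equal_function : Prop := ∀ (num : List Int) (operand : List String), Dom_function num operand → Pre_function num operand → Spec_function num operand (function num operand)

-- ===== LEMMAS AND PROOFS =====

-- A's loop body, on the pair (operand[i], num[i+1]).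
def pvStep (st : Int × Int) (o : String) (x : Int) : Int × Int :=
  let flag : Int := if o = "-" then 1 else st.2
  if flag = 0 then (st.1 + x, flag) else (st.1 - x, flag)

-- All-subtract phase: once the flag is 1 everything is subtracted.
lemma pv_subrun : ∀ (ps : List (String × Int)) (s : Int),
    ps.foldl (fun st p => pvStep st p.1 p.2) (s, 1) = (s - (ps.map Prod.snd).sum, 1) := by
  intro ps
  induction ps with
  | nil => simp
  | cons p t ih =>
    intro s
    have hstep : pvStep (s, 1) p.1 p.2 = (s - p.2, 1) := by simp [pvStep]
    simp only [List.foldl_cons, hstep, ih, List.map_cons, List.sum_cons, Prod.mk.injEq]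
    exact ⟨by ring, trivial⟩

-- Characterisation of the zip fold by the position of the first "-".
lemma pv_runchar : ∀ (ps : List (String × Int)) (s : Int),
    (ps.foldl (fun st p => pvStep st p.1 p.2) (s, 0)).1 =
      match PySem.List.index? (ps.map Prod.fst) "-" with
      | none => s + (ps.map Prod.snd).sum
      | some j => s + ((ps.map Prod.snd).take j).sum - ((ps.map Prod.snd).drop j).sum := by
  intro ps
  induction ps with
  | nil => simp [PySem.List.index?]
  | cons p t ih =>
    intro s
    by_cases ho : p.1 = "-"
    · have hstep : pvStep (s, 0) "-" p.2 = (s - p.2, 1) := by simp [pvStep]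
      simp only [List.foldl_cons, ho, hstep, pv_subrun, List.map_cons]
      rw [PySem.List.index?_cons_self]
      simp
      ring
    · have hstep : pvStep (s, 0) p.1 p.2 = (s + p.2, 0) := by simp [pvStep, ho]
      simp only [List.foldl_cons, hstep, ih, List.map_cons]
      rw [PySem.List.index?_cons_of_ne _ ho]
      cases h : PySem.List.index? (t.map Prod.fst) "-" with
      | none => simp; ring
      | some j => simp; ring

-- Bridge: A's index-driven fold is the fold of pvStep over operand zipped with num's tail.
lemma pv_bridge : ∀ (ops : List String) (xs : List Int) (st : Int × Int),
    ops.length + 1 ≤ xs.length →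
    (PySem.List.pyRange 0 (PySem.List.len ops) 1).foldl
      (fun st i => pvStep st (PySem.List.pyGetD ops i "") (PySem.List.pyGetD xs (i + 1) 0)) st
    = (ops.zip xs.tail).foldl (fun st p => pvStep st p.1 p.2) st := by
  intro ops
  induction ops with
  | nil => intro xs st h; simp [PySem.List.pyRange_one_eq_nil]
  | cons o t ih =>
    intro xs st h
    match xs, h with
    | x0 :: x1 :: rest, h =>
      have hlen : PySem.List.len (o :: t) = ((t.length : Int) + 1) := by
        simp [PySem.List.len_eq]
      rw [hlen, PySem.List.pyRange_one_cons (by omega)]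
      simp only [List.foldl_cons]
      have h0 : pvStep st (PySem.List.pyGetD (o :: t) 0 "") (PySem.List.pyGetD (x0 :: x1 :: rest) (0 + 1) 0)
          = pvStep st o x1 := by
        norm_num [PySem.List.pyGetD_zero_cons]
        rw [show (1 : Int) = ((1 : Nat) : Int) by norm_num, PySem.List.pyGetD_natCast]
        rfl
      rw [h0]
      have hshift : PySem.List.pyRange (0 + 1) ((t.length : Int) + 1) 1
          = (List.range t.length).map (fun k => ((k + 1 : Nat) : Int)) := by
        norm_num [PySem.List.pyRange_one]
        intro a _
        ring
      have hbase : PySem.List.pyRange 0 (PySem.List.len t) 1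
          = (List.range t.length).map (fun k => ((k : Nat) : Int)) := by
        simp [PySem.List.pyRange_one]
      rw [hshift, List.foldl_map]
      have hIH := ih (x1 :: rest) (pvStep st o x1) (by simp at h ⊢; omega)
      rw [hbase, List.foldl_map] at hIH
      have hbody : (fun (st : Int × Int) (k : Nat) =>
            pvStep st (PySem.List.pyGetD (o :: t) ((k + 1 : Nat) : Int) "") (PySem.List.pyGetD (x0 :: x1 :: rest) (((k + 1 : Nat) : Int) + 1) 0))
          = (fun (st : Int × Int) (k : Nat) => pvStep st (PySem.List.pyGetD t ((k : Nat) : Int) "") (PySem.List.pyGetD (x1 :: rest) (((k : Nat) : Int) + 1) 0)) := by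
        funext st' k
        have e1 : PySem.List.pyGetD (o :: t) ((k + 1 : Nat) : Int) "" = PySem.List.pyGetD t ((k : Nat) : Int) "" := by
          rw [PySem.List.pyGetD_natCast, PySem.List.pyGetD_natCast, List.getD_cons_succ]
        have e2 : PySem.List.pyGetD (x0 :: x1 :: rest) (((k + 1 : Nat) : Int) + 1) 0
            = PySem.List.pyGetD (x1 :: rest) (((k : Nat) : Int) + 1) 0 := by
          rw [show ((k + 1 : Nat) : Int) + 1 = ((k + 2 : Nat) : Int) by push_cast; ring,
              show ((k : Nat) : Int) + 1 = ((k + 1 : Nat) : Int) by push_cast; ring]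
          rw [PySem.List.pyGetD_natCast, PySem.List.pyGetD_natCast, List.getD_cons_succ]
        rw [e1, e2]
      rw [hbody]
      simpa using hIH

-- The second components of the zip are num's tail truncated to operand's length.
lemma pv_zip_snd : ∀ (l1 : List String) (l2 : List Int), l1.length ≤ l2.length →
    (l1.zip l2).map Prod.snd = l2.take l1.length := by
  intro l1
  induction l1 with
  | nil => intro l2 h; simp
  | cons a t ih =>
    intro l2 h
    match l2, h with
    | b :: l2', h =>
      simp only [List.zip_cons_cons, List.map_cons, List.length_cons, List.take_succ_cons]
      rw [ih l2' (by simpa using h)]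

theorem pv_main_eq (num : List Int) (operand : List String) (hpre : operand.length < num.length) :
    function num operand = function_alt num operand := by
  match num, hpre with
  | n0 :: rest, hpre =>
    have hlen : operand.length ≤ rest.length := by simpa using hpre
    unfold function function_alt
    simp only [PySem.List.pyGetD_zero_cons]
    have hstep : (fun (st : Int × Int) (i : Int) =>
        let flag : Int := if PySem.List.pyGetD operand i "" = "-" then 1 else st.2
        if flag = 0 then (st.1 + PySem.List.pyGetD (n0 :: rest) (i + 1) 0, flag)
        else (st.1 - PySem.List.pyGetD (n0 :: rest) (i + 1) 0, flag))
        = (fun st i => pvStep st (PySem.List.pyGetD operand i "") (PySem.List.pyGetD (n0 :: rest) (i + 1) 0)) := rfl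
    rw [hstep, pv_bridge operand (n0 :: rest) (n0, 0) (by simpa using hpre)]
    have hz := pv_runchar (operand.zip (n0 :: rest).tail) n0
    simp only [List.tail_cons] at hz ⊢
    rw [hz]
    rw [List.map_fst_zip hlen, pv_zip_snd _ _ hlen]
    have hlo : PySem.List.len operand + 1 = ((operand.length + 1 : Nat) : Int) := by
      simp [PySem.List.len_eq]
    have h1 : (1 : Int) = ((1 : Nat) : Int) := rfl
    cases hidx : PySem.List.index? operand "-" with
    | none =>
      simp only
      rw [hlo, h1, PySem.List.slice_natCast]
      simp
    | some j =>
      obtain ⟨hj, -, -⟩ := PySem.List.getElem_of_index?_eq_some hidx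
      simp only
      rw [hlo, show ((j : Nat) : Int) + 1 = ((j + 1 : Nat) : Int) by push_cast; ring, h1,
          PySem.List.slice_natCast, PySem.List.slice_natCast]
      simp only [List.drop_succ_cons, List.take_take, List.drop_take,
        min_eq_left hj.le, Nat.succ_sub_succ, Nat.sub_zero, List.drop_zero]

-- ===== VERDICT (by name: the statement is the Claim_ definition above) =====
theorem function_spec : Claim_equal_function := by
  intro num operand _ hpre
  unfold Pre_function at hpre
  unfold Spec_function
  exact pv_main_eq num operand hpre
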